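-- pv_equiv track=rewrite | github.com/RomainDaguerre/OMNI | scripts/OMNI/table.py | merge_ortholog_groups
-- ===== SOURCE A (Python) =====
-- def merge_ortholog_groups(sonic_ortholog, orthofinder_ortholog, orthologer_ortholog):
--     """
--     Merges ortholog group data from three different sources by associating
--     each protein ID with its ortholog group from each source.
--
--     Parameters
--     ----------
--     sonic_ortholog : dict
--         Dictionary of SonicParanoid ortholog groupings: {protein_id: {"ortholog_group": group_data}}.
--     orthofinder_ortholog : dict
--         Dictionary of OrthoFinder ortholog groupings.
--     orthologer_ortholog : dict
--         Dictionary of Orthologer ortholog groupings.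
--
--     Returns
--     -------
--     dict
--         A merged dictionary where each protein ID maps to a sub-dictionary of
--         source-to-group associations:
--         {
--             protein_id: {
--                 "sonic": group_data,
--                 "orthofinder": group_data,
--                 "orthologer": group_data
--             }
--         }
--     """
--     merged_dict = {}
--
--     for ortho_type, ortholog_data in {
--         "sonic": sonic_ortholog,
--         "orthofinder": orthofinder_ortholog,
--         "orthologer": orthologer_ortholog
--     }.items():
--         for prot_id, data in ortholog_data.items():
--             if prot_id not in merged_dict:
--                 merged_dict[prot_id] = {}
--             merged_dict[prot_id][ortho_type] = data["ortholog_group"]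
--
--     return merged_dict
-- ===== SOURCE B (Python) =====
-- def merge_ortholog_groups(sonic_ortholog, orthofinder_ortholog, orthologer_ortholog):
--     sources = (
--         ("sonic", sonic_ortholog),
--         ("orthofinder", orthofinder_ortholog),
--         ("orthologer", orthologer_ortholog),
--     )
--     all_ids = dict.fromkeys([*sonic_ortholog, *orthofinder_ortholog, *orthologer_ortholog])
--     return {
--         prot_id: {
--             name: data[prot_id]["ortholog_group"]
--             for name, data in sources
--             if prot_id in data
--         }
--         for prot_id in all_ids
--     }
-- ===== Notes on version B (the rewrite author's own statement) =====
-- stated objective: alternative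
-- what changed: Inverts A's source-outer/protein-inner mutation loop into a protein-outer pass: the protein IDs are deduplicated up front (dict.fromkeys over the three key sets) and each merged sub-dict is built in one comprehension by membership checks against the three sources, with no incremental dict mutation.
import Mathlib
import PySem

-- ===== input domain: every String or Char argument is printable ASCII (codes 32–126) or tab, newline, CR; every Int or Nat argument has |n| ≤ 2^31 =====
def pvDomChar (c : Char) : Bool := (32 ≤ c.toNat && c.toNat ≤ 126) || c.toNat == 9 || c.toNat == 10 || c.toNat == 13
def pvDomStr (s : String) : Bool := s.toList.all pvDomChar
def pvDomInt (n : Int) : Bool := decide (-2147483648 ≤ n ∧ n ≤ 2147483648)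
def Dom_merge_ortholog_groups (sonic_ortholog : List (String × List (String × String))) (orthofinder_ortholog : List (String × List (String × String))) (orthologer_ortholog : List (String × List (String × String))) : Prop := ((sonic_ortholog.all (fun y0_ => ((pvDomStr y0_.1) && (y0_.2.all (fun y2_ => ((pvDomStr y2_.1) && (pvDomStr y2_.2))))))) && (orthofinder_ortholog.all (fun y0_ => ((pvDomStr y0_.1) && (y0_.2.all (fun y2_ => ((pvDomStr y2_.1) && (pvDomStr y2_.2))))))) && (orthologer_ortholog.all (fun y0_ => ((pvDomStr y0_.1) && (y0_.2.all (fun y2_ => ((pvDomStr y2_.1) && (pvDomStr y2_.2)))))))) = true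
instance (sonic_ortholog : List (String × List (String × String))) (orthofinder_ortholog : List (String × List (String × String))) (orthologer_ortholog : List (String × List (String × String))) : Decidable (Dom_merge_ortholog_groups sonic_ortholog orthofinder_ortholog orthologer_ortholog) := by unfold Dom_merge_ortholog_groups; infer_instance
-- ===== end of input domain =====

-- B replaces A's source-outer mutation loop by a protein-outer pass over the deduplicated key union; alternative decomposition, same cost.


-- ===== PORT A =====
-- first-match lookup in a dict given as an association list (exact: Python 'd[k]' / 'k in d' under Pre_, which forbids duplicate keys)
def pvGetItem? {α : Type} : List (String × α) → String → Option α
  | [], _ => none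
  | p :: rest, k => if p.1 = k then some p.2 else pvGetItem? rest k

-- data["ortholog_group"]; Pre_ guarantees the key is present, so the default is never used
def pvOG (data : List (String × String)) : String := (pvGetItem? data "ortholog_group").getD ""

-- Python 'd[k] = v': overwrite in place, append a new key at the end (exact)
def pvSetItem {α : Type} : List (String × α) → String → α → List (String × α)
  | [], k, v => [(k, v)]
  | p :: rest, k, v => if p.1 = k then (k, v) :: rest else p :: pvSetItem rest k v

-- 'merged_dict[prot_id][ortho_type] = …': rewrite the (first) entry for this key in place
def pvUpdateAt {α : Type} : List (String × α) → String → (α → α) → List (String × α)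
  | [], _, _ => []
  | p :: rest, k, f => if p.1 = k then (p.1, f p.2) :: rest else p :: pvUpdateAt rest k f

-- body of A's inner loop: 'if prot_id not in merged: merged[prot_id] = {}' then 'merged[prot_id][ortho_type] = data["ortholog_group"]'
def pvStep (ortho_type : String) (merged : List (String × List (String × String))) (pd : String × List (String × String)) : List (String × List (String × String)) :=
  let m := if (pvGetItem? merged pd.1).isSome then merged else merged ++ [(pd.1, [])]
  pvUpdateAt m pd.1 (fun sub => pvSetItem sub ortho_type (pvOG pd.2))

def merge_ortholog_groups (sonic_ortholog : List (String × List (String × String))) (orthofinder_ortholog : List (String × List (String × String))) (orthologer_ortholog : List (String × List (String × String))) : List (String × List (String × String)) :=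
  [("sonic", sonic_ortholog), ("orthofinder", orthofinder_ortholog), ("orthologer", orthologer_ortholog)].foldl
    (fun merged src => src.2.foldl (pvStep src.1) merged) []

-- ===== PORT B =====
def merge_ortholog_groups_alt (sonic_ortholog : List (String × List (String × String))) (orthofinder_ortholog : List (String × List (String × String))) (orthologer_ortholog : List (String × List (String × String))) : List (String × List (String × String)) :=
  let sources := [("sonic", sonic_ortholog), ("orthofinder", orthofinder_ortholog), ("orthologer", orthologer_ortholog)]
  -- dict.fromkeys([*s, *o, *l]) = the key union, first occurrences in order
  (PySem.Set.ofList (sonic_ortholog.map Prod.fst ++ orthofinder_ortholog.map Prod.fst ++ orthologer_ortholog.map Prod.fst)).map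
    (fun prot_id => (prot_id, sources.filterMap (fun src =>
      (pvGetItem? src.2 prot_id).map (fun data => (src.1, pvOG data)))))

-- ===== PRECONDITION & SPEC =====
-- Pre_ excludes association lists with duplicate keys (not representable as the Python dicts A receives, so A never
-- returns on them) and inner dicts missing the "ortholog_group" key (on which A raises KeyError).
def Pre_merge_ortholog_groups (sonic_ortholog : List (String × List (String × String))) (orthofinder_ortholog : List (String × List (String × String))) (orthologer_ortholog : List (String × List (String × String))) : Prop :=
  (sonic_ortholog.map Prod.fst).Nodup ∧ (orthofinder_ortholog.map Prod.fst).Nodup ∧ (orthologer_ortholog.map Prod.fst).Nodup ∧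
  ∀ pd ∈ sonic_ortholog ++ orthofinder_ortholog ++ orthologer_ortholog,
    (pd.2.map Prod.fst).Nodup ∧ "ortholog_group" ∈ pd.2.map Prod.fst
instance (sonic_ortholog : List (String × List (String × String))) (orthofinder_ortholog : List (String × List (String × String))) (orthologer_ortholog : List (String × List (String × String))) : Decidable (Pre_merge_ortholog_groups sonic_ortholog orthofinder_ortholog orthologer_ortholog) := by unfold Pre_merge_ortholog_groups; infer_instance

def pvWitness_merge_ortholog_groups : (List (String × List (String × String))) × (List (String × List (String × String))) × (List (String × List (String × String))) :=
  ([("p1", [("ortholog_group", "g1")]), ("p2", [("ortholog_group", "g2")])],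
   [("p2", [("ortholog_group", "g3")])],
   [("p3", [("ortholog_group", "g4")])])

def Spec_merge_ortholog_groups (sonic_ortholog : List (String × List (String × String))) (orthofinder_ortholog : List (String × List (String × String))) (orthologer_ortholog : List (String × List (String × String))) (out : List (String × List (String × String))) : Prop := out = merge_ortholog_groups_alt sonic_ortholog orthofinder_ortholog orthologer_ortholog
instance (sonic_ortholog : List (String × List (String × String))) (orthofinder_ortholog : List (String × List (String × String))) (orthologer_ortholog : List (String × List (String × String))) (out : List (String × List (String × String))) : Decidable (Spec_merge_ortholog_groups sonic_ortholog orthofinder_ortholog orthologer_ortholog out) := by unfold Spec_merge_ortholog_groups; infer_instance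

-- ===== CLAIM (what is proved, stated in full; the proofs are below) =====
def Claim_equal_merge_ortholog_groups : Prop := ∀ (sonic_ortholog : List (String × List (String × String))) (orthofinder_ortholog : List (String × List (String × String))) (orthologer_ortholog : List (String × List (String × String))), Dom_merge_ortholog_groups sonic_ortholog orthofinder_ortholog orthologer_ortholog → Pre_merge_ortholog_groups sonic_ortholog orthofinder_ortholog orthologer_ortholog → Spec_merge_ortholog_groups sonic_ortholog orthofinder_ortholog orthologer_ortholog (merge_ortholog_groups sonic_ortholog orthofinder_ortholog orthologer_ortholog)

-- ===== LEMMAS AND PROOFS =====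

-- merging one source (name, e) into an already-merged table m, described non-iteratively
def mergeOne (m : List (String × List (String × String))) (name : String) (e : List (String × List (String × String))) : List (String × List (String × String)) :=
  m.map (fun pr => (pr.1, match pvGetItem? e pr.1 with
    | some data => pr.2 ++ [(name, pvOG data)]
    | none => pr.2))
  ++ (e.filter (fun pd => (pvGetItem? m pd.1).isNone)).map (fun pd => (pd.1, [(name, pvOG pd.2)]))

-- B's result over an arbitrary list of sources
def bres (srcs : List (String × List (String × List (String × String)))) : List (String × List (String × String)) :=
  (PySem.Set.ofList (srcs.flatMap (fun src => src.2.map Prod.fst))).map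
    (fun pid => (pid, srcs.filterMap (fun src => (pvGetItem? src.2 pid).map (fun data => (src.1, pvOG data)))))

theorem pvGetItem?_eq_none_iff {α : Type} (m : List (String × α)) (k : String) :
    pvGetItem? m k = none ↔ k ∉ m.map Prod.fst := by
  induction m with
  | nil => simp [pvGetItem?]
  | cons p rest ih =>
    by_cases h : p.1 = k
    · subst h; simp [pvGetItem?]
    · simp [pvGetItem?, h, ih, Ne.symm h]

theorem pvGetItem?_append {α : Type} (m m' : List (String × α)) (k : String) :
    pvGetItem? (m ++ m') k = match pvGetItem? m k with
      | some v => some v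
      | none => pvGetItem? m' k := by
  induction m with
  | nil => simp [pvGetItem?]
  | cons p rest ih =>
    by_cases h : p.1 = k <;> simp [pvGetItem?, h, ih]

theorem pvGetItem?_isNone_map {α : Type} (m : List (String × α)) (F : String × α → String × α)
    (hF : ∀ pr, (F pr).1 = pr.1) (k : String) :
    (pvGetItem? (m.map F) k).isNone = (pvGetItem? m k).isNone := by
  induction m with
  | nil => rfl
  | cons p rest ih =>
    simp only [List.map_cons, pvGetItem?, hF p]
    by_cases h : p.1 = k
    · simp [h]
    · simp [h, ih]

theorem pvGetItem?_map_mk {α : Type} (l : List String) (g : String → α) (k : String) :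
    pvGetItem? (l.map (fun x => (x, g x))) k = if k ∈ l then some (g k) else none := by
  induction l with
  | nil => simp [pvGetItem?]
  | cons x xs ih =>
    by_cases h : x = k
    · subst h; simp [pvGetItem?]
    · simp [pvGetItem?, h, ih, Ne.symm h]

theorem pvGetItem?_of_mem {α : Type} (e : List (String × α)) (pd : String × α)
    (hmem : pd ∈ e) (hnd : (e.map Prod.fst).Nodup) : pvGetItem? e pd.1 = some pd.2 := by
  induction e with
  | nil => simp at hmem
  | cons p rest ih =>
    simp only [List.map_cons, List.nodup_cons] at hnd
    rcases List.mem_cons.mp hmem with h | h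
    · subst h; simp [pvGetItem?]
    · have hne : p.1 ≠ pd.1 := by
        intro hq
        exact hnd.1 (hq ▸ List.mem_map_of_mem h)
      simp [pvGetItem?, hne, ih h hnd.2]

theorem pvSetItem_of_not_mem {α : Type} (sub : List (String × α)) (k : String) (v : α)
    (h : k ∉ sub.map Prod.fst) : pvSetItem sub k v = sub ++ [(k, v)] := by
  induction sub with
  | nil => rfl
  | cons p rest ih =>
    simp only [List.map_cons, List.mem_cons, not_or] at h
    simp [pvSetItem, Ne.symm h.1, ih h.2]

theorem pvUpdateAt_append_of_not_mem {α : Type} (m m' : List (String × α)) (k : String) (f : α → α)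
    (h : k ∉ m.map Prod.fst) : pvUpdateAt (m ++ m') k f = m ++ pvUpdateAt m' k f := by
  induction m with
  | nil => rfl
  | cons p rest ih =>
    simp only [List.map_cons, List.mem_cons, not_or] at h
    simp [pvUpdateAt, Ne.symm h.1, ih h.2]

theorem pvUpdateAt_eq_map {α : Type} (m : List (String × α)) (k : String) (f : α → α)
    (hnd : (m.map Prod.fst).Nodup) :
    pvUpdateAt m k f = m.map (fun pr => if pr.1 = k then (pr.1, f pr.2) else pr) := by
  induction m with
  | nil => rfl
  | cons p rest ih =>
    simp only [List.map_cons, List.nodup_cons] at hnd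
    by_cases h : p.1 = k
    · subst h
      have hrest : ∀ pr ∈ rest, (if pr.1 = p.1 then (pr.1, f pr.2) else pr) = pr := by
        intro pr hpr
        have hne : pr.1 ≠ p.1 := fun e => hnd.1 (e ▸ List.mem_map_of_mem hpr)
        simp [hne]
      simp [pvUpdateAt, List.map_congr_left hrest]
    · simp [pvUpdateAt, h, ih hnd.2]

-- A's inner loop over one source equals mergeOne
theorem foldl_pvStep_eq_mergeOne (name : String) :
    ∀ (e m : List (String × List (String × String))), (e.map Prod.fst).Nodup → (m.map Prod.fst).Nodup →
    (∀ pr ∈ m, pr.1 ∈ e.map Prod.fst → name ∉ pr.2.map Prod.fst) →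
    e.foldl (pvStep name) m = mergeOne m name e := by
  intro e
  induction e with
  | nil =>
    intro m _ _ _
    simp [mergeOne, pvGetItem?]
  | cons pd rest ih =>
    intro m hnde hndm hname
    simp only [List.map_cons, List.nodup_cons] at hnde
    obtain ⟨hpid, hndrest⟩ := hnde
    rw [List.foldl_cons]
    by_cases h : (pvGetItem? m pd.1).isSome
    · -- key already present: the entry is updated in place
      obtain ⟨sub0, hsub0⟩ := Option.isSome_iff_exists.mp h
      have hstep : pvStep name m pd =
          m.map (fun pr => if pr.1 = pd.1 then (pr.1, pr.2 ++ [(name, pvOG pd.2)]) else pr) := by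
        unfold pvStep
        rw [if_pos h, pvUpdateAt_eq_map _ _ _ hndm]
        apply List.map_congr_left
        intro pr hpr
        by_cases hk : pr.1 = pd.1
        · rw [if_pos hk, if_pos hk,
            pvSetItem_of_not_mem _ _ _ (hname pr hpr (by simp [hk]))]
        · rw [if_neg hk, if_neg hk]
      rw [hstep]
      have hkeys : ((m.map (fun pr : String × List (String × String) =>
            if pr.1 = pd.1 then (pr.1, pr.2 ++ [(name, pvOG pd.2)]) else pr)).map Prod.fst)
          = m.map Prod.fst := by
        rw [List.map_map]
        apply List.map_congr_left
        intro pr _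
        by_cases hk : pr.1 = pd.1 <;> simp [hk]
      rw [ih _ hndrest (by rw [hkeys]; exact hndm) ?hn]
      case hn =>
        intro pr' hpr' hmem
        obtain ⟨pr, hpr, rfl⟩ := List.mem_map.mp hpr'
        by_cases hk : pr.1 = pd.1
        · exfalso
          apply hpid
          have : (if pr.1 = pd.1 then (pr.1, pr.2 ++ [(name, pvOG pd.2)]) else pr).1 = pd.1 := by
            simp [hk]
          rw [this] at hmem
          exact hmem
        · rw [if_neg hk] at hmem ⊢
          exact hname pr hpr (by simp [hmem])
      -- mergeOne (m.map F) name rest = mergeOne m name (pd :: rest)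
      unfold mergeOne
      have hnone : pvGetItem? rest pd.1 = none := (pvGetItem?_eq_none_iff _ _).mpr hpid
      have hmap : (m.map (fun pr : String × List (String × String) =>
            if pr.1 = pd.1 then (pr.1, pr.2 ++ [(name, pvOG pd.2)]) else pr)).map
            (fun pr => (pr.1, match pvGetItem? rest pr.1 with
              | some data => pr.2 ++ [(name, pvOG data)]
              | none => pr.2))
          = m.map (fun pr => (pr.1, match pvGetItem? (pd :: rest) pr.1 with
              | some data => pr.2 ++ [(name, pvOG data)]
              | none => pr.2)) := by
        rw [List.map_map]
        apply List.map_congr_left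
        intro pr _
        by_cases hk : pr.1 = pd.1
        · simp [Function.comp, hk, hnone, pvGetItem?]
        · simp [Function.comp, hk, pvGetItem?, Ne.symm hk]
      rw [hmap]
      have hfilter : rest.filter (fun q => (pvGetItem? (m.map (fun pr : String × List (String × String) =>
            if pr.1 = pd.1 then (pr.1, pr.2 ++ [(name, pvOG pd.2)]) else pr)) q.1).isNone)
          = rest.filter (fun q => (pvGetItem? m q.1).isNone) := by
        apply List.filter_congr
        intro q _
        exact pvGetItem?_isNone_map m _ (fun pr => by by_cases hk : pr.1 = pd.1 <;> simp [hk]) q.1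
      rw [hfilter]
      have hhead : (pd :: rest).filter (fun q => (pvGetItem? m q.1).isNone)
          = rest.filter (fun q => (pvGetItem? m q.1).isNone) := by
        simp [hsub0]
      rw [hhead]
    · -- key absent: a fresh entry is appended
      have hnone : pvGetItem? m pd.1 = none := by
        cases hg : pvGetItem? m pd.1 with
        | none => rfl
        | some v => rw [hg] at h; simp at h
      have hpd_not : pd.1 ∉ m.map Prod.fst := (pvGetItem?_eq_none_iff _ _).mp hnone
      have hstep : pvStep name m pd = m ++ [(pd.1, [(name, pvOG pd.2)])] := by
        unfold pvStep
        rw [if_neg h, pvUpdateAt_append_of_not_mem _ _ _ _ hpd_not]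
        simp [pvUpdateAt, pvSetItem]
      rw [hstep]
      rw [ih _ hndrest ?nd ?hn]
      case nd =>
        simp only [List.map_append, List.map_cons, List.map_nil]
        exact (List.nodup_append).mpr ⟨hndm, List.nodup_singleton _,
          fun a ha b hb => by
            rw [List.mem_singleton] at hb
            subst hb
            exact fun hcontra => hpd_not (hcontra ▸ ha)⟩
      case hn =>
        intro pr hpr hmem
        rcases List.mem_append.mp hpr with hin | hin
        · exact hname pr hin (by simp [hmem])
        · simp only [List.mem_singleton] at hin
          subst hin
          exact absurd hmem hpid
      -- mergeOne (m ++ [E]) name rest = mergeOne m name (pd :: rest)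
      unfold mergeOne
      have hnrest : pvGetItem? rest pd.1 = none := (pvGetItem?_eq_none_iff _ _).mpr hpid
      rw [List.map_append]
      have hmap : m.map (fun pr => (pr.1, match pvGetItem? rest pr.1 with
              | some data => pr.2 ++ [(name, pvOG data)]
              | none => pr.2))
          = m.map (fun pr => (pr.1, match pvGetItem? (pd :: rest) pr.1 with
              | some data => pr.2 ++ [(name, pvOG data)]
              | none => pr.2)) := by
        apply List.map_congr_left
        intro pr hpr
        have hk : pr.1 ≠ pd.1 := fun e => hpd_not (e ▸ List.mem_map_of_mem hpr)
        simp [pvGetItem?, Ne.symm hk]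
      rw [hmap]
      have hsing : ([((pd.1 : String), [((name : String), pvOG pd.2)])].map
            (fun pr => (pr.1, match pvGetItem? rest pr.1 with
              | some data => pr.2 ++ [(name, pvOG data)]
              | none => pr.2)))
          = [(pd.1, [(name, pvOG pd.2)])] := by
        simp [hnrest]
      rw [hsing]
      have hfilter : rest.filter (fun q => (pvGetItem? (m ++ [(pd.1, [(name, pvOG pd.2)])]) q.1).isNone)
          = rest.filter (fun q => (pvGetItem? m q.1).isNone) := by
        apply List.filter_congr
        intro q hq
        have hk : pd.1 ≠ q.1 := fun e => hpid (e ▸ List.mem_map_of_mem hq)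
        rw [pvGetItem?_append]
        cases pvGetItem? m q.1 <;> simp [pvGetItem?, hk]
      rw [hfilter]
      have hhead : (pd :: rest).filter (fun q => (pvGetItem? m q.1).isNone)
          = pd :: rest.filter (fun q => (pvGetItem? m q.1).isNone) := by
        simp [hnone]
      rw [hhead, List.map_cons, List.append_assoc]
      rfl

theorem bres_keys_nodup (srcs : List (String × List (String × List (String × String)))) :
    ((bres srcs).map Prod.fst).Nodup := by
  unfold bres
  rw [List.map_map]
  exact (PySem.Set.nodup_ofList _).map (fun a b h => h)

theorem bres_sub_keys (srcs : List (String × List (String × List (String × String))))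
    (pr : String × List (String × String)) (hpr : pr ∈ bres srcs) :
    ∀ q ∈ pr.2, q.1 ∈ srcs.map Prod.fst := by
  intro q hq
  unfold bres at hpr
  obtain ⟨pid, _, rfl⟩ := List.mem_map.mp hpr
  simp only at hq
  obtain ⟨src, hsrc, hmap⟩ := List.mem_filterMap.mp hq
  obtain ⟨data, _, hdq⟩ := Option.map_eq_some_iff.mp hmap
  rw [← hdq]
  exact List.mem_map_of_mem hsrc

theorem bres_fresh (srcs : List (String × List (String × List (String × String)))) (nm : String)
    (hnm : nm ∉ srcs.map Prod.fst) :
    ∀ pr ∈ bres srcs, nm ∉ pr.2.map Prod.fst := by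
  intro pr hpr hmem
  obtain ⟨q, hq, hq1⟩ := List.mem_map.mp hmem
  exact hnm (hq1 ▸ bres_sub_keys srcs pr hpr q hq)

-- B's result grows by mergeOne, one source at a time
theorem bres_snoc (srcs : List (String × List (String × List (String × String)))) (name : String)
    (e : List (String × List (String × String))) (hnd : (e.map Prod.fst).Nodup) :
    bres (srcs ++ [(name, e)]) = mergeOne (bres srcs) name e := by
  unfold bres mergeOne
  rw [List.flatMap_append]
  have hflat : ([((name : String), e)].flatMap (fun src => src.2.map Prod.fst)) = e.map Prod.fst := by
    simp
  rw [hflat, PySem.Set.ofList_append, PySem.Set.update_eq_append_filter,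
    PySem.Set.ofList_eq_self_of_nodup _ hnd, List.map_append]
  have hcont : ∀ y, PySem.Set.contains (PySem.Set.ofList (srcs.flatMap (fun src => src.2.map Prod.fst))) y
      = decide (y ∈ PySem.Set.ofList (srcs.flatMap (fun src => src.2.map Prod.fst))) := by
    intro y
    by_cases hy : y ∈ PySem.Set.ofList (srcs.flatMap (fun src => src.2.map Prod.fst))
    · simp [hy]
    · simp only [hy, decide_false]
      cases hc : PySem.Set.contains (PySem.Set.ofList (srcs.flatMap (fun src => src.2.map Prod.fst))) y
      · rfl
      · exact absurd ((PySem.Set.contains_iff _ _).mp hc) hy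
  -- part 1: the already-present ids
  have hpart1 : (PySem.Set.ofList (srcs.flatMap (fun src => src.2.map Prod.fst))).map
        (fun pid => (pid, (srcs ++ [(name, e)]).filterMap
          (fun src => (pvGetItem? src.2 pid).map (fun data => (src.1, pvOG data)))))
      = ((PySem.Set.ofList (srcs.flatMap (fun src => src.2.map Prod.fst))).map
          (fun pid => (pid, srcs.filterMap
            (fun src => (pvGetItem? src.2 pid).map (fun data => (src.1, pvOG data)))))).map
          (fun pr => (pr.1, match pvGetItem? e pr.1 with
            | some data => pr.2 ++ [(name, pvOG data)]
            | none => pr.2)) := by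
    rw [List.map_map]
    apply List.map_congr_left
    intro pid _
    simp only [Function.comp, List.filterMap_append]
    cases hg : pvGetItem? e pid <;> simp [hg]
  rw [hpart1]
  -- part 2: the genuinely new ids
  have hnewpred : ((e.map Prod.fst).filter
        (fun y => !(PySem.Set.contains (PySem.Set.ofList (srcs.flatMap (fun src => src.2.map Prod.fst))) y)))
      = (e.filter (fun q => !(decide (q.1 ∈ PySem.Set.ofList (srcs.flatMap (fun src => src.2.map Prod.fst)))))).map Prod.fst := by
    rw [List.filter_map]
    congr 1
    apply List.filter_congr
    intro q _
    simp only [Function.comp]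
    rw [hcont]
  rw [hnewpred]
  have hpart2 : ((e.filter (fun q => !(decide (q.1 ∈ PySem.Set.ofList (srcs.flatMap (fun src => src.2.map Prod.fst)))))).map Prod.fst).map
        (fun pid => (pid, (srcs ++ [(name, e)]).filterMap
          (fun src => (pvGetItem? src.2 pid).map (fun data => (src.1, pvOG data)))))
      = (e.filter (fun pd => (pvGetItem? ((PySem.Set.ofList (srcs.flatMap (fun src => src.2.map Prod.fst))).map
            (fun pid => (pid, srcs.filterMap
              (fun src => (pvGetItem? src.2 pid).map (fun data => (src.1, pvOG data)))))) pd.1).isNone)).map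
          (fun pd => (pd.1, [(name, pvOG pd.2)])) := by
    have hpred : ∀ q : String × List (String × String),
        (pvGetItem? ((PySem.Set.ofList (srcs.flatMap (fun src => src.2.map Prod.fst))).map
            (fun pid => (pid, srcs.filterMap
              (fun src => (pvGetItem? src.2 pid).map (fun data => (src.1, pvOG data)))))) q.1).isNone
        = !(decide (q.1 ∈ PySem.Set.ofList (srcs.flatMap (fun src => src.2.map Prod.fst)))) := by
      intro q
      rw [pvGetItem?_map_mk]
      by_cases hy : q.1 ∈ PySem.Set.ofList (srcs.flatMap (fun src => src.2.map Prod.fst)) <;> simp [hy]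
    rw [List.map_map, List.filter_congr (fun q _ => hpred q)]
    apply List.map_congr_left
    intro q hq
    have hq' := List.mem_filter.mp hq
    have hqs : q.1 ∉ PySem.Set.ofList (srcs.flatMap (fun src => src.2.map Prod.fst)) := by
      simpa using hq'.2
    have hnotin : q.1 ∉ srcs.flatMap (fun src => src.2.map Prod.fst) :=
      fun hmem => hqs ((PySem.Set.mem_ofList _ _).mpr hmem)
    simp only [Function.comp, List.filterMap_append]
    have hnil : srcs.filterMap (fun src => (pvGetItem? src.2 q.1).map (fun data => (src.1, pvOG data))) = [] := by
      rw [List.filterMap_eq_nil_iff]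
      intro src hsrc
      have : q.1 ∉ src.2.map Prod.fst := by
        intro hk
        exact hnotin (List.mem_flatMap.mpr ⟨src, hsrc, hk⟩)
      rw [(pvGetItem?_eq_none_iff _ _).mpr this]
      rfl
    have hsome : pvGetItem? e q.1 = some q.2 := pvGetItem?_of_mem e q hq'.1 hnd
    simp [hnil, hsome]
  rw [hpart2]
-- ===== VERDICT (by name: the statement is the Claim_ definition above) =====
theorem merge_ortholog_groups_spec : Claim_equal_merge_ortholog_groups := by
  unfold Claim_equal_merge_ortholog_groups
  intro s o l _hdom hpre
  obtain ⟨hs, ho, hl, _hinner⟩ := hpre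
  unfold Spec_merge_ortholog_groups
  have hA : merge_ortholog_groups s o l = bres [("sonic", s), ("orthofinder", o), ("orthologer", l)] := by
    unfold merge_ortholog_groups
    simp only [List.foldl_cons, List.foldl_nil]
    have hb1 : s.foldl (pvStep "sonic") [] = bres [("sonic", s)] := by
      rw [foldl_pvStep_eq_mergeOne "sonic" s [] hs (by simp) (by simp)]
      exact (bres_snoc [] "sonic" s hs).symm
    rw [hb1]
    have hb2 : o.foldl (pvStep "orthofinder") (bres [("sonic", s)]) = bres [("sonic", s), ("orthofinder", o)] := by
      rw [foldl_pvStep_eq_mergeOne "orthofinder" o _ ho (bres_keys_nodup _)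
        (fun pr hpr _ => bres_fresh _ "orthofinder" (by simp) pr hpr)]
      exact (bres_snoc [("sonic", s)] "orthofinder" o ho).symm
    rw [hb2]
    rw [foldl_pvStep_eq_mergeOne "orthologer" l _ hl (bres_keys_nodup _)
      (fun pr hpr _ => bres_fresh _ "orthologer" (by simp) pr hpr)]
    exact (bres_snoc [("sonic", s), ("orthofinder", o)] "orthologer" l hl).symm
  have hB : merge_ortholog_groups_alt s o l = bres [("sonic", s), ("orthofinder", o), ("orthologer", l)] := by
    unfold merge_ortholog_groups_alt bres
    simp [List.flatMap_cons, List.flatMap_nil, List.append_nil, List.append_assoc]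
  rw [hA, hB]
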